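-- pv_equiv track=rewrite | github.com/jonnynewburgh/cd-command-center | etl/load_headstart_pir.py | build_health_code_map
-- ===== SOURCE A (Python) =====
-- def _find_col(descs, codes, *keywords):
--     """
--     Find column index where ALL keywords appear in the description (case-insensitive).
--     Returns the question code at that index, or None.
--     """
--     for i, desc in enumerate(descs):
--         if desc is None:
--             continue
--         d = str(desc).lower()
--         if all(kw.lower() in d for kw in keywords):
--             return codes[i] if i < len(codes) else None
--     return None
--
-- def build_health_code_map(descs, codes):
--     """Build code map for Section C (health)."""
--     m = {}
--     m["children_with_insurance_start"] = (
--         _find_col(descs, codes, "Health Insurance", "Enrollment")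
--         or _find_col(descs, codes, "health insurance at enrollment")
--     )
--     m["children_with_insurance_end"] = (
--         _find_col(descs, codes, "Health Insurance", "End")
--     )
--     m["children_medicaid_start"] = (
--         _find_col(descs, codes, "Medicaid", "Enrollment")
--     )
--     m["children_no_insurance_start"] = (
--         _find_col(descs, codes, "no health insurance at enrollment")
--         or _find_col(descs, codes, "no health insurance")
--     )
--     m["children_with_medical_home_start"] = (
--         _find_col(descs, codes, "ongoing source of continuous")
--         or _find_col(descs, codes, "medical home")
--     )
--     m["children_at_fqhc_start"] = (
--         _find_col(descs, codes, "federally qualified Health Center")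
--         or _find_col(descs, codes, "FQHC")
--     )
--     return {k: v for k, v in m.items() if v is not None}
-- ===== SOURCE B (Python) =====
-- _SPECS = [
--     ("children_with_insurance_start", ("health insurance", "enrollment"), ("health insurance at enrollment",)),
--     ("children_with_insurance_end", ("health insurance", "end"), None),
--     ("children_medicaid_start", ("medicaid", "enrollment"), None),
--     ("children_no_insurance_start", ("no health insurance at enrollment",), ("no health insurance",)),
--     ("children_with_medical_home_start", ("ongoing source of continuous",), ("medical home",)),
--     ("children_at_fqhc_start", ("federally qualified health center",), ("fqhc",)),
-- ]
--
-- def build_health_code_map(descs, codes):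
--     """Build code map for Section C (health): one pass over descs recording,
--     per field, the first index matching its primary / fallback keyword set."""
--     prim = [None] * len(_SPECS)
--     fall = [None] * len(_SPECS)
--     for i, desc in enumerate(descs):
--         if desc is None:
--             continue
--         d = str(desc).lower()
--         prim = [i if pj is None and all(kw in d for kw in p) else pj
--                 for (_, p, _), pj in zip(_SPECS, prim)]
--         fall = [i if f is not None and fj is None and all(kw in d for kw in f) else fj
--                 for (_, _, f), fj in zip(_SPECS, fall)]
--     def code(i):
--         if i is None or i >= len(codes):
--             return None
--         return codes[i]
--     out = {}
--     for (key, _, f), pj, fj in zip(_SPECS, prim, fall):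
--         v = code(pj)
--         if f is not None:
--             v = v or code(fj)
--         if v is not None:
--             out[key] = v
--     return out
-- ===== Notes on version B (the rewrite author's own statement) =====
-- stated objective: alternative
-- what changed: A runs six fields' worth of independent _find_col full scans (10 scans of descs in the worst case); B makes a single pass over descs, recording per field spec the first index matching its primary and fallback keyword sets, and assembles the map afterwards.
import Mathlib
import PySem

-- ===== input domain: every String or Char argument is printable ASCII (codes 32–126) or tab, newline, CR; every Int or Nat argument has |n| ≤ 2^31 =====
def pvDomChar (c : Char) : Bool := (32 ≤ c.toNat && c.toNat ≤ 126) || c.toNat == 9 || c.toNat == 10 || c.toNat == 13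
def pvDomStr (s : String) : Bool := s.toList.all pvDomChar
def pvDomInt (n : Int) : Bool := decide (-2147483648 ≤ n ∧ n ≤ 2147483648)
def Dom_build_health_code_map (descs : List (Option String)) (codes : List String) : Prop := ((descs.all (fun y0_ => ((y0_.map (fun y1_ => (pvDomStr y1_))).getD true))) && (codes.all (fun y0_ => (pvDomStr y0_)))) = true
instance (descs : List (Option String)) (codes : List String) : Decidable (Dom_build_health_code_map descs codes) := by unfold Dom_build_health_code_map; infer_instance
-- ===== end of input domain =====

-- B replaces A's six independent full scans of `descs` by a single pass that records,
-- per field, the first index matching its primary / fallback keyword set (objective: alternative).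

-- ===== PORT A =====
-- Python `x or y` on Optional[str] (None and "" are falsy); used by both ports.
def pyOrStr (a b : Option String) : Option String :=
  match a with
  | some s => if s = "" then b else some s
  | none => b

-- _find_col's enumerate loop (i is the running index).
def find_col_go (codes : List String) (keywords : List String) : Nat → List (Option String) → Option String
  | _, [] => none
  | i, none :: rest => find_col_go codes keywords (i+1) rest
  | i, some desc :: rest =>
      let d := PySem.Str.lower desc
      if keywords.all (fun kw => PySem.Str.isIn (PySem.Str.lower kw) d) then
        (if i < codes.length then codes[i]? else none)
      else find_col_go codes keywords (i+1) rest

def find_col (descs : List (Option String)) (codes : List String) (keywords : List String) : Option String :=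
  find_col_go codes keywords 0 descs

def build_health_code_map (descs : List (Option String)) (codes : List String) : List (String × String) :=
  let m : PySem.Dict String (Option String) := PySem.Dict.empty
  let m := m.insert "children_with_insurance_start"
      (pyOrStr (find_col descs codes ["Health Insurance", "Enrollment"])
               (find_col descs codes ["health insurance at enrollment"]))
  let m := m.insert "children_with_insurance_end"
      (find_col descs codes ["Health Insurance", "End"])
  let m := m.insert "children_medicaid_start"
      (find_col descs codes ["Medicaid", "Enrollment"])
  let m := m.insert "children_no_insurance_start"
      (pyOrStr (find_col descs codes ["no health insurance at enrollment"])
               (find_col descs codes ["no health insurance"]))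
  let m := m.insert "children_with_medical_home_start"
      (pyOrStr (find_col descs codes ["ongoing source of continuous"])
               (find_col descs codes ["medical home"]))
  let m := m.insert "children_at_fqhc_start"
      (pyOrStr (find_col descs codes ["federally qualified Health Center"])
               (find_col descs codes ["FQHC"]))
  m.items.filterMap (fun kv => kv.2.map (fun v => (kv.1, v)))

-- ===== PORT B =====
-- _SPECS: (output key, primary keywords, optional fallback keywords), pre-lowercased.
def bSpecs : List (String × List String × Option (List String)) :=
  [ ("children_with_insurance_start", ["health insurance", "enrollment"], some ["health insurance at enrollment"]),
    ("children_with_insurance_end", ["health insurance", "end"], none),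
    ("children_medicaid_start", ["medicaid", "enrollment"], none),
    ("children_no_insurance_start", ["no health insurance at enrollment"], some ["no health insurance"]),
    ("children_with_medical_home_start", ["ongoing source of continuous"], some ["medical home"]),
    ("children_at_fqhc_start", ["federally qualified health center"], some ["fqhc"]) ]

-- all(kw in d for kw in kws)
def kwAll (kws : List String) (d : String) : Bool := kws.all (fun kw => PySem.Str.isIn kw d)

-- the single pass: prim/fall hold, per spec, the first matching index found so far
def bLoop : Nat → List (Option Nat) → List (Option Nat) → List (Option String) → List (Option Nat) × List (Option Nat)
  | _, prim, fall, [] => (prim, fall)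
  | i, prim, fall, none :: rest => bLoop (i+1) prim fall rest
  | i, prim, fall, some desc :: rest =>
      let d := PySem.Str.lower desc
      bLoop (i+1)
        (List.zipWith (fun sp pj => if pj = none ∧ kwAll sp.2.1 d then some i else pj) bSpecs prim)
        (List.zipWith (fun sp fj => if sp.2.2.isSome ∧ fj = none ∧ kwAll (sp.2.2.getD []) d then some i else fj) bSpecs fall)
        rest

-- def code(i): None if i is None or i >= len(codes) else codes[i]
def codeAt (codes : List String) : Option Nat → Option String
  | none => none
  | some i => if i < codes.length then codes[i]? else none

def build_health_code_map_alt (descs : List (Option String)) (codes : List String) : List (String × String) :=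
  let st := bLoop 0 (List.replicate bSpecs.length none) (List.replicate bSpecs.length none) descs
  let out := (List.zip bSpecs (List.zip st.1 st.2)).foldl
      (fun (out : PySem.Dict String String) x =>
        let v := codeAt codes x.2.1
        let v := match x.1.2.2 with
          | none => v
          | some _ => pyOrStr v (codeAt codes x.2.2)
        match v with
        | none => out
        | some s => out.insert x.1.1 s)
      PySem.Dict.empty
  out.items

-- ===== PRECONDITION & SPEC =====
def Spec_build_health_code_map (descs : List (Option String)) (codes : List String) (out : List (String × String)) : Prop := out = build_health_code_map_alt descs codes
instance (descs : List (Option String)) (codes : List String) (out : List (String × String)) : Decidable (Spec_build_health_code_map descs codes out) := by unfold Spec_build_health_code_map; infer_instance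

-- ===== CLAIM (what is proved, stated in full; the proofs are below) =====
def Claim_equal_build_health_code_map : Prop := ∀ (descs : List (Option String)) (codes : List String), Dom_build_health_code_map descs codes → Spec_build_health_code_map descs codes (build_health_code_map descs codes)

-- ===== LEMMAS AND PROOFS =====

-- first index ≥ i whose (lowered) description satisfies p
def firstIdxFrom (p : String → Bool) : Nat → List (Option String) → Option Nat
  | _, [] => none
  | i, none :: rest => firstIdxFrom p (i+1) rest
  | i, some desc :: rest =>
      if p (PySem.Str.lower desc) then some i else firstIdxFrom p (i+1) rest

def orO : Option Nat → Option Nat → Option Nat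
  | some a, _ => some a
  | none, b => b

theorem find_col_go_eq (codes kws : List String) (i : Nat) (ds : List (Option String)) :
    find_col_go codes kws i ds
      = codeAt codes (firstIdxFrom (fun d => kws.all (fun kw => PySem.Str.isIn (PySem.Str.lower kw) d)) i ds) := by
  induction ds generalizing i with
  | nil => rfl
  | cons hd tl ih =>
    cases hd with
    | none => simpa [find_col_go, firstIdxFrom] using ih (i+1)
    | some desc =>
      simp only [find_col_go, firstIdxFrom]
      split_ifs with h h2
      · simp [codeAt, h2]
      · simp [codeAt, h2]
      · exact ih (i+1)

theorem find_col_eq (descs : List (Option String)) (codes kws kws' : List String)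
    (h : kws.map PySem.Str.lower = kws') :
    find_col descs codes kws = codeAt codes (firstIdxFrom (kwAll kws') 0 descs) := by
  subst h
  rw [find_col, find_col_go_eq]
  congr 1
  congr 1
  funext d
  simp [kwAll, List.all_map, Function.comp_def]

theorem zipWith_snd {a b : Type} (l1 : List a) (l2 : List b) (h : l2.length = l1.length) :
    List.zipWith (fun _ x => x) l1 l2 = l2 := by
  induction l1 generalizing l2 with
  | nil => cases l2 <;> simp_all
  | cons x t ih => cases l2 with
    | nil => simp_all
    | cons y t2 => simp_all

theorem zipWith_ext {a b c : Type} (f g : a -> b -> c) (h : forall x y, f x y = g x y)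
    (l1 : List a) (l2 : List b) : List.zipWith f l1 l2 = List.zipWith g l1 l2 := by
  induction l1 generalizing l2 with
  | nil => simp
  | cons x t ih => cases l2 <;> simp_all

theorem zipWith3_self {a b c : Type} (f : a -> a -> b -> c) (l : List a) (l2 : List b) :
    List.zipWith3 f l l l2 = List.zipWith (fun x y => f x x y) l l2 := by
  induction l generalizing l2 with
  | nil => simp [List.zipWith3]
  | cons x t ih => cases l2 <;> simp_all [List.zipWith3]

theorem bLoop_eq (ds : List (Option String)) (i : Nat) (prim fall : List (Option Nat))
    (hp : prim.length = bSpecs.length) (hf : fall.length = bSpecs.length) :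
    bLoop i prim fall ds
      = (List.zipWith (fun sp pj => orO pj (firstIdxFrom (kwAll sp.2.1) i ds)) bSpecs prim,
         List.zipWith (fun sp fj =>
            match sp.2.2 with
            | none => fj
            | some f => orO fj (firstIdxFrom (kwAll f) i ds)) bSpecs fall) := by
  induction ds generalizing i prim fall with
  | nil =>
    refine Prod.ext ?_ ?_
    · show prim = List.zipWith (fun sp pj => orO pj (firstIdxFrom (kwAll sp.2.1) i [])) bSpecs prim
      rw [zipWith_ext (fun sp pj => orO pj (firstIdxFrom (kwAll sp.2.1) i [])) (fun _ x => x)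
            (fun sp pj => by cases pj <;> rfl) bSpecs prim, zipWith_snd _ _ hp]
    · show fall = List.zipWith (fun (sp : String × List String × Option (List String)) fj =>
            match sp.2.2 with
            | none => fj
            | some f => orO fj (firstIdxFrom (kwAll f) i [])) bSpecs fall
      rw [zipWith_ext (fun (sp : String × List String × Option (List String)) (fj : Option Nat) =>
            match sp.2.2 with
            | none => fj
            | some f => orO fj (firstIdxFrom (kwAll f) i [])) (fun _ x => x)
            (fun sp fj => by cases h : sp.2.2 <;> cases fj <;> simp [h, firstIdxFrom, orO]) bSpecs fall,
          zipWith_snd _ _ hf]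
  | cons hd tl ih =>
    cases hd with
    | none =>
      rw [show bLoop i prim fall (none :: tl) = bLoop (i+1) prim fall tl from rfl,
          ih (i+1) prim fall hp hf]
      simp only [firstIdxFrom]
    | some desc =>
      rw [show bLoop i prim fall (some desc :: tl)
            = bLoop (i+1)
                (List.zipWith (fun sp pj => if pj = none ∧ kwAll sp.2.1 (PySem.Str.lower desc) then some i else pj) bSpecs prim)
                (List.zipWith (fun sp fj => if sp.2.2.isSome = true ∧ fj = none ∧ kwAll (sp.2.2.getD []) (PySem.Str.lower desc) then some i else fj) bSpecs fall)
                tl from rfl,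
          ih (i+1) _ _ (by simp [hp]) (by simp [hf]),
          List.zipWith_zipWith_right, List.zipWith_zipWith_right,
          zipWith3_self, zipWith3_self]
      refine Prod.ext ?_ ?_ <;> simp only
      · apply zipWith_ext
        intro sp pj
        cases pj with
        | some v => simp [orO]
        | none =>
          by_cases h : (kwAll sp.2.1 (PySem.Str.lower desc) = true) <;>
            simp [h, orO, firstIdxFrom]
      · apply zipWith_ext
        intro sp fj
        cases h : sp.2.2 with
        | none => simp
        | some f =>
          cases fj with
          | some v => simp [orO]
          | none =>
            by_cases hm : (kwAll f (PySem.Str.lower desc) = true) <;>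
              simp [hm, orO, firstIdxFrom]

-- ===== VERDICT (by name: the statement is the Claim_ definition above) =====
set_option maxHeartbeats 2000000 in
theorem build_health_code_map_spec : Claim_equal_build_health_code_map := by
  intro descs codes _
  unfold Spec_build_health_code_map build_health_code_map build_health_code_map_alt
  rw [bLoop_eq descs 0 _ _ (by simp) (by simp)]
  rw [find_col_eq descs codes ["Health Insurance", "Enrollment"] ["health insurance", "enrollment"] (by decide)]
  rw [find_col_eq descs codes ["health insurance at enrollment"] ["health insurance at enrollment"] (by decide)]
  rw [find_col_eq descs codes ["Health Insurance", "End"] ["health insurance", "end"] (by decide)]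
  rw [find_col_eq descs codes ["Medicaid", "Enrollment"] ["medicaid", "enrollment"] (by decide)]
  rw [find_col_eq descs codes ["no health insurance at enrollment"] ["no health insurance at enrollment"] (by decide)]
  rw [find_col_eq descs codes ["no health insurance"] ["no health insurance"] (by decide)]
  rw [find_col_eq descs codes ["ongoing source of continuous"] ["ongoing source of continuous"] (by decide)]
  rw [find_col_eq descs codes ["medical home"] ["medical home"] (by decide)]
  rw [find_col_eq descs codes ["federally qualified Health Center"] ["federally qualified health center"] (by decide)]
  rw [find_col_eq descs codes ["FQHC"] ["fqhc"] (by decide)]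
  simp only [bSpecs, List.zip, orO, List.length_cons, List.length_nil, List.replicate,
    List.zipWith, List.foldl]
  generalize pyOrStr (codeAt codes (firstIdxFrom (kwAll ["health insurance", "enrollment"]) 0 descs))
      (codeAt codes (firstIdxFrom (kwAll ["health insurance at enrollment"]) 0 descs)) = w1
  generalize codeAt codes (firstIdxFrom (kwAll ["health insurance", "end"]) 0 descs) = w2
  generalize codeAt codes (firstIdxFrom (kwAll ["medicaid", "enrollment"]) 0 descs) = w3
  generalize pyOrStr (codeAt codes (firstIdxFrom (kwAll ["no health insurance at enrollment"]) 0 descs))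
      (codeAt codes (firstIdxFrom (kwAll ["no health insurance"]) 0 descs)) = w4
  generalize pyOrStr (codeAt codes (firstIdxFrom (kwAll ["ongoing source of continuous"]) 0 descs))
      (codeAt codes (firstIdxFrom (kwAll ["medical home"]) 0 descs)) = w5
  generalize pyOrStr (codeAt codes (firstIdxFrom (kwAll ["federally qualified health center"]) 0 descs))
      (codeAt codes (firstIdxFrom (kwAll ["fqhc"]) 0 descs)) = w6
  rcases w1 with _ | v1 <;> rcases w2 with _ | v2 <;> rcases w3 with _ | v3 <;>
    rcases w4 with _ | v4 <;> rcases w5 with _ | v5 <;> rcases w6 with _ | v6 <;>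
    simp [PySem.Dict.empty, PySem.Dict.insert, PySem.Dict.contains, List.filterMap]
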